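-- pv_equiv track=rewrite | github.com/mmartin-sub/libriscribe | src/libriscribe/agents/editor.py | extract_scene_titles
-- ===== SOURCE A (Python) =====
-- def extract_scene_titles(chapter_content: str) -> list[str]:
--     """
--     Extracts scene titles from chapter content.
--     Looks for lines starting with '**' and containing a colon, e.g.:
--     **Scène 1 : Title**
--     **Scene 2: Title**
--     **Szene 3: Titel**
--     """
--     scene_titles = []
--     lines = chapter_content.split("\n")
--     for line in lines:
--         line = line.strip()
--         if line.startswith("**") and ":" in line and line.endswith("**"):
--             # Remove the surrounding '**'
--             title = line[2:-2].strip()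
--             scene_titles.append(title)
--     return scene_titles
-- ===== SOURCE B (Python) =====
-- import re
--
-- _SCENE_RE = re.compile(r'^\s*\*\*(.*:.*)\*\*\s*$', re.MULTILINE)
--
--
-- def extract_scene_titles(chapter_content: str) -> list[str]:
--     return [m.group(1).strip() for m in _SCENE_RE.finditer(chapter_content)]
-- ===== Notes on version B (the rewrite author's own statement) =====
-- stated objective: idiomatic
-- what changed: B replaces A's explicit split/strip/startswith/endswith line loop by a single multiline regular expression, r'^\s*\*\*(.*:.*)\*\*\s*$' with re.MULTILINE, iterating re.finditer over the whole text and collecting the stripped capture groups.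
import Mathlib
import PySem

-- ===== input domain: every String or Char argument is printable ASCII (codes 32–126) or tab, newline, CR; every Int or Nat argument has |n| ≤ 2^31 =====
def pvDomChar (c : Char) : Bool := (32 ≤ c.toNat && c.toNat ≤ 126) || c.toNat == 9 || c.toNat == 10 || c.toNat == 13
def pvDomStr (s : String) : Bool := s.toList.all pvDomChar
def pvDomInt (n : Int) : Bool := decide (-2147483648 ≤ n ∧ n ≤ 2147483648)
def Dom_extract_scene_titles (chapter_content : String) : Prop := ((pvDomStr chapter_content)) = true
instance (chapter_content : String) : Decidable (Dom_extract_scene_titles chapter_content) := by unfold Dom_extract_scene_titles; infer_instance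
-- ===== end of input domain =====

-- B replaces A's explicit split/strip/startswith/endswith line loop by one multiline regex
-- (re.finditer of r'^\s*\*\*(.*:.*)\*\*\s*$') scanned over the whole text; same values, no speed claim.

-- ===== PORT A =====
-- literal port of A: split on "\n", per line strip, test startswith/'in'/endswith, append line[2:-2].strip()
def extract_scene_titles (chapter_content : String) : List String :=
  (PySem.Chars.splitOn chapter_content.toList ['\n']).foldl
    (fun scene_titles line =>
      let l := PySem.Chars.strip line
      if PySem.Chars.startswith l ['*', '*'] && PySem.Chars.isIn [':'] l && PySem.Chars.endswith l ['*', '*'] then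
        scene_titles ++ [String.ofList (PySem.Chars.strip (PySem.Chars.slice l (some 2) (some (-2))))]
      else scene_titles)
    []

-- ===== PORT B =====
-- Hand port of re.finditer(r'^\s*\*\*(.*:.*)\*\*\s*$', re.MULTILINE) over the text, one capture group per match.
-- pvScan is called at a MULTILINE '^' position (start of text / just after a '\n') and transcribes one finditer step:
--   * '^\s*'  : the greedy whitespace skip is `dropWhile isspace` (deterministic: the next pattern char '*' is not \s);
--               Python's re '\s' agrees with PySem.Chars.isspace on every character admitted by Dom_extract_scene_titles
--               (' ', '\t', '\n', '\r'); the skip may run across entirely-blank lines, exactly as in Python.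
--   * '\*\*'  : the literal check `take 2 = ['*','*']`.
--   * '(.*:.*)\*\*\s*$' : '.' does not match '\n', so the rest of the match lives inside the current line
--               (`takeWhile (· != '\n')`); greedy backtracking admits exactly one candidate for the closing '\*\*'
--               (right-stripping the line must end in "**", since '\s*$' forces everything after it to be whitespace
--               up to the line end and '*' is not whitespace), and the group '(.*:.*)' is what precedes it and must
--               contain a ':'.  This determinisation of the backtracking search is exact.
--   * on failure, finditer advances: the next possible match starts at the next '^', i.e. after the next '\n';
--   * on success it resumes after the matched line; a greedy '\s*$' that runs on across following blank lines can
--               only skip lines that match nothing, so the sequence of capture groups is unchanged.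
def pvScan (cs : List Char) : List (List Char) :=
  let aw := cs.dropWhile PySem.Chars.isspace
  if aw.take 2 = ['*', '*'] then
    let rest := aw.drop 2
    let core := PySem.Chars.rstrip (rest.takeWhile (· != '\n'))
    if PySem.Chars.endswith core ['*', '*'] && PySem.Chars.isIn [':'] (core.take (core.length - 2)) then
      let rem := rest.dropWhile (· != '\n')
      core.take (core.length - 2) :: (if _h : rem = [] then [] else pvScan rem.tail)
    else
      let dw := cs.dropWhile (· != '\n')
      if _h : dw = [] then [] else pvScan dw.tail
  else
    let dw := cs.dropWhile (· != '\n')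
    if _h : dw = [] then [] else pvScan dw.tail
termination_by cs.length
decreasing_by
  · have h1 := List.length_dropWhile_le (· != '\n') ((cs.dropWhile PySem.Chars.isspace).drop 2)
    have h2 := List.length_drop (l := cs.dropWhile PySem.Chars.isspace) (i := 2)
    have h3 := List.length_dropWhile_le PySem.Chars.isspace cs
    have h4 : 0 < ((cs.dropWhile PySem.Chars.isspace).drop 2 |>.dropWhile (· != '\n')).length :=
      List.length_pos_iff.mpr _h
    simp only [List.length_tail]
    omega
  · have h1 := List.length_dropWhile_le (· != '\n') cs
    have h4 : 0 < (cs.dropWhile (· != '\n')).length := List.length_pos_iff.mpr _h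
    simp only [List.length_tail]
    omega
  · have h1 := List.length_dropWhile_le (· != '\n') cs
    have h4 : 0 < (cs.dropWhile (· != '\n')).length := List.length_pos_iff.mpr _h
    simp only [List.length_tail]
    omega

-- Source B: [m.group(1).strip() for m in _SCENE_RE.finditer(chapter_content)]
def extract_scene_titles_alt (chapter_content : String) : List String :=
  (pvScan chapter_content.toList).map (fun g => String.ofList (PySem.Chars.strip g))

-- ===== PRECONDITION & SPEC =====
def Spec_extract_scene_titles (chapter_content : String) (out : List String) : Prop := out = extract_scene_titles_alt chapter_content
instance (chapter_content : String) (out : List String) : Decidable (Spec_extract_scene_titles chapter_content out) := by unfold Spec_extract_scene_titles; infer_instance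

-- ===== CLAIM (what is proved, stated in full; the proofs are below) =====
def Claim_equal_extract_scene_titles : Prop := ∀ (chapter_content : String), Dom_extract_scene_titles chapter_content → Spec_extract_scene_titles chapter_content (extract_scene_titles chapter_content)

-- ===== LEMMAS AND PROOFS =====

-- the lines of a text, split at '\n' (Python's s.split("\n"))
def pvLines (cs : List Char) : List (List Char) :=
  (cs.takeWhile (· != '\n')) ::
    (if _h : cs.dropWhile (· != '\n') = [] then [] else pvLines (cs.dropWhile (· != '\n')).tail)
termination_by cs.length
decreasing_by
  have h1 := List.length_dropWhile_le (· != '\n') cs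
  have h4 : 0 < (cs.dropWhile (· != '\n')).length := List.length_pos_iff.mpr _h
  simp only [List.length_tail]
  omega

-- A's per-line test and extraction
def pvP (line : List Char) : Bool :=
  PySem.Chars.startswith (PySem.Chars.strip line) ['*', '*'] &&
    PySem.Chars.isIn [':'] (PySem.Chars.strip line) &&
    PySem.Chars.endswith (PySem.Chars.strip line) ['*', '*']

def pvG (line : List Char) : String :=
  String.ofList (PySem.Chars.strip (PySem.Chars.slice (PySem.Chars.strip line) (some 2) (some (-2))))

-- B's per-line capture group (the regex applied to one line)
def pvFB (line : List Char) : Option (List Char) :=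
  let aw := line.dropWhile PySem.Chars.isspace
  if aw.take 2 = ['*', '*'] then
    let core := PySem.Chars.rstrip ((aw.drop 2).takeWhile (· != '\n'))
    if PySem.Chars.endswith core ['*', '*'] && PySem.Chars.isIn [':'] (core.take (core.length - 2)) then
      some (core.take (core.length - 2))
    else none
  else none

-- splitOn.go characterised by pvLines
lemma pv_go_spec : ∀ (fuel : Nat) (l cur : List Char) (accs : List (List Char)), l.length ≤ fuel →
    PySem.Chars.splitOn.go ['\n'] fuel l cur accs =
      accs.reverse ++ (cur.reverse ++ l.takeWhile (· != '\n')) ::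
        (if _h : l.dropWhile (· != '\n') = [] then [] else pvLines (l.dropWhile (· != '\n')).tail) := by
  intro fuel
  induction fuel with
  | zero =>
    intro l cur accs h
    have hl : l = [] := List.eq_nil_of_length_eq_zero (Nat.le_zero.mp h)
    subst hl
    rw [PySem.Chars.splitOn.go.eq_def]
    simp
  | succ n ih =>
    intro l cur accs h
    cases l with
    | nil =>
      rw [PySem.Chars.splitOn.go.eq_def]
      simp
    | cons c rest =>
      by_cases hc : c = '\n'
      · subst hc
        rw [PySem.Chars.splitOn.go.eq_def]
        have hpre : ['\n'].isPrefixOf ('\n' :: rest) = true := by simp [List.isPrefixOf]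
        simp only [hpre, if_true, List.length_cons]
        simp only [List.length_cons, List.length_nil, Nat.zero_add, List.drop_succ_cons,
          List.drop_zero]
        rw [ih rest [] (cur.reverse :: accs) (by simp at h; omega)]
        have htw : ('\n' :: rest).takeWhile (· != '\n') = [] := by simp [List.takeWhile_cons]
        have hdw : ('\n' :: rest).dropWhile (· != '\n') = '\n' :: rest := by simp [List.dropWhile_cons]
        rw [htw, hdw]
        rw [dif_neg (by simp : ¬('\n' :: rest = []))]
        conv_rhs => rw [pvLines]
        simp
      · rw [PySem.Chars.splitOn.go.eq_def]
        have hpre : ['\n'].isPrefixOf (c :: rest) = false := by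
          simp [List.isPrefixOf]
          exact fun hh => absurd hh.symm hc
        simp only [hpre, Bool.false_eq_true, if_false]
        rw [ih rest (c :: cur) accs (by simp at h; omega)]
        have htw : (c :: rest).takeWhile (· != '\n') = c :: rest.takeWhile (· != '\n') := by
          simp [List.takeWhile_cons, hc]
        have hdw : (c :: rest).dropWhile (· != '\n') = rest.dropWhile (· != '\n') := by
          simp [List.dropWhile_cons, hc]
        rw [htw, hdw]
        simp

lemma pv_splitOn_eq (cs : List Char) : PySem.Chars.splitOn cs ['\n'] = pvLines cs := by
  show PySem.Chars.splitOn.go ['\n'] (cs.length + 1) cs [] [] = pvLines cs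
  rw [pv_go_spec (cs.length + 1) cs [] [] (by omega)]
  conv_rhs => rw [pvLines]
  simp

lemma pv_A_shape (c : String) :
    extract_scene_titles c = ((pvLines c.toList).filter pvP).map pvG := by
  unfold extract_scene_titles
  rw [pv_splitOn_eq]
  have hfun : (fun (scene_titles : List String) (line : List Char) =>
      let l := PySem.Chars.strip line
      if PySem.Chars.startswith l ['*', '*'] && PySem.Chars.isIn [':'] l && PySem.Chars.endswith l ['*', '*'] then
        scene_titles ++ [String.ofList (PySem.Chars.strip (PySem.Chars.slice l (some 2) (some (-2))))]
      else scene_titles) =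
      (fun acc x => if pvP x = true then acc ++ [pvG x] else acc) := rfl
  rw [hfun, PySem.List.foldl_append_if pvP pvG]
  simp

-- every member of pvLines is free of '\n'
lemma pv_lines_no_nl_aux : ∀ (n : Nat) (cs : List Char), cs.length ≤ n →
    ∀ l ∈ pvLines cs, ∀ x ∈ l, x ≠ '\n' := by
  intro n
  induction n with
  | zero =>
    intro cs h l hl x hx
    have : cs = [] := List.eq_nil_of_length_eq_zero (Nat.le_zero.mp h)
    subst this
    rw [pvLines] at hl
    simp at hl
    subst hl
    simp at hx
  | succ n ih =>
    intro cs h l hl x hx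
    rw [pvLines] at hl
    rcases List.mem_cons.mp hl with hl | hl
    · subst hl
      have := List.mem_takeWhile_imp hx
      simpa using this
    · rcases hdw : cs.dropWhile (· != '\n') with _ | ⟨c0, t⟩
      · rw [hdw] at hl; simp at hl
      · rw [hdw] at hl
        rw [dif_neg (by simp)] at hl
        have hlen : t.length ≤ n := by
          have h1 := List.length_dropWhile_le (· != '\n') cs
          rw [hdw] at h1
          simp at h1
          omega
        exact ih t hlen l (by simpa using hl) x hx

lemma pv_lines_no_nl (cs : List Char) : ∀ l ∈ pvLines cs, ∀ x ∈ l, x ≠ '\n' :=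
  pv_lines_no_nl_aux cs.length cs le_rfl

-- basic facts about rstrip / strip / isIn
lemma pv_rstrip_cons (c : Char) (l : List Char) (hc : PySem.Chars.isspace c = false) :
    PySem.Chars.rstrip (c :: l) = c :: PySem.Chars.rstrip l := by
  simp only [PySem.Chars.rstrip, List.reverse_cons]
  rw [List.dropWhile_append]
  split_ifs with h
  · rw [List.isEmpty_iff] at h
    rw [h]
    simp [List.dropWhile_cons, hc]
  · simp

lemma pv_rstrip_prefix (l : List Char) : PySem.Chars.rstrip l <+: l := by
  have h : List.dropWhile PySem.Chars.isspace l.reverse <:+ l.reverse :=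
    List.dropWhile_suffix _
  have h2 := List.reverse_prefix.mpr h
  simpa [PySem.Chars.rstrip] using h2

lemma pv_strip_eq (l : List Char) :
    PySem.Chars.strip l = PySem.Chars.rstrip (l.dropWhile PySem.Chars.isspace) := rfl

lemma pv_isIn_singleton (c : Char) (l : List Char) : PySem.Chars.isIn [c] l = true ↔ c ∈ l := by
  rw [PySem.Chars.isIn_iff_infix]
  constructor
  · intro h
    exact h.subset (by simp)
  · intro h
    obtain ⟨s, t, rfl⟩ := List.append_of_mem h
    exact ⟨s, t, by simp⟩

lemma pv_take2_cons (aw : List Char) (h2 : aw.take 2 = ['*', '*']) :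
    ∃ r, aw = '*' :: '*' :: r := by
  cases aw with
  | nil => simp at h2
  | cons a t =>
    cases t with
    | nil => simp at h2
    | cons b u =>
      simp [List.take] at h2
      exact ⟨u, by simp [h2.1, h2.2]⟩

lemma pv_slice_2_neg2 (xs : List Char) (m : Nat) (h : xs.length = m + 4) :
    PySem.Chars.slice xs (some 2) (some (-2)) = (xs.drop 2).take m := by
  rw [PySem.Chars.slice_eq_listSlice]
  have h1 : PySem.List.clampIdx xs.length 2 = 2 := by
    simp [PySem.List.clampIdx]
    omega
  have h2 : PySem.List.clampIdx xs.length (-2) = xs.length - 2 :=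
    PySem.List.clampIdx_neg_ofNat xs.length 2 (by omega)
  simp only [PySem.List.slice, h1, h2]
  congr 1
  omega

-- the per-line equivalence: A's strip/startswith/in/endswith test and slice extraction
-- agree with B's regex capture group on any single line
lemma pv_perline (line : List Char) (h : ∀ x ∈ line, x ≠ '\n') :
    (if pvP line then some (pvG line) else none) =
      (pvFB line).map (fun g => String.ofList (PySem.Chars.strip g)) := by
  by_cases h2 : (line.dropWhile PySem.Chars.isspace).take 2 = ['*', '*']
  · obtain ⟨r, hr⟩ := pv_take2_cons _ h2
    have hr_nl : ∀ x ∈ r, (x != '\n') = true := by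
      intro x hx
      have hx1 : x ∈ line.dropWhile PySem.Chars.isspace := by simp [hr, hx]
      have hx2 : x ∈ line := (List.dropWhile_sublist _).subset hx1
      simpa using h x hx2
    have htw : r.takeWhile (· != '\n') = r := List.takeWhile_eq_self_iff.mpr hr_nl
    have hstar : PySem.Chars.isspace '*' = false := by decide
    have hs : PySem.Chars.strip line = '*' :: '*' :: PySem.Chars.rstrip r := by
      rw [pv_strip_eq, hr, pv_rstrip_cons _ _ hstar, pv_rstrip_cons _ _ hstar]
    set k := PySem.Chars.rstrip r with hk
    have hFB : pvFB line =
        if PySem.Chars.endswith k ['*', '*'] && PySem.Chars.isIn [':'] (k.take (k.length - 2)) then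
          some (k.take (k.length - 2))
        else none := by
      simp only [pvFB, hr]
      rw [if_pos (show List.take 2 ('*' :: '*' :: r) = ['*', '*'] from rfl)]
      rw [show ('*' :: '*' :: r).drop 2 = r from rfl, htw]
    by_cases hB : (PySem.Chars.endswith k ['*', '*'] && PySem.Chars.isIn [':'] (k.take (k.length - 2))) = true
    · have he : PySem.Chars.endswith k ['*', '*'] = true := by
        simp [Bool.and_eq_true] at hB; exact hB.1
      have hcmem : ':' ∈ k.take (k.length - 2) := by
        simp [Bool.and_eq_true] at hB
        exact (pv_isIn_singleton _ _).mp hB.2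
      have hsuf : ['*', '*'] <:+ k := (PySem.Chars.endswith_iff _ _).mp he
      have hke : k = k.take (k.length - 2) ++ ['*', '*'] := by
        have hdropeq : ['*', '*'] = k.drop (k.length - 2) := by
          have := List.suffix_iff_eq_drop.mp hsuf
          simpa using this
        conv_lhs => rw [← List.take_append_drop (k.length - 2) k]
        rw [← hdropeq]
      have hk2 : 2 ≤ k.length := by
        have := congrArg List.length hke
        simp at this
        omega
      have hP : pvP line = true := by
        have m0 : PySem.Chars.startswith (PySem.Chars.strip line) ['*', '*'] = true := by
          rw [hs]
          exact (PySem.Chars.startswith_iff _ _).mpr ⟨k, rfl⟩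
        have m1 : PySem.Chars.isIn [':'] (PySem.Chars.strip line) = true := by
          rw [hs, pv_isIn_singleton]
          have : ':' ∈ k := by
            rw [hke]
            exact List.mem_append.mpr (Or.inl hcmem)
          simp [this]
        have m2 : PySem.Chars.endswith (PySem.Chars.strip line) ['*', '*'] = true := by
          rw [hs]
          exact (PySem.Chars.endswith_iff _ _).mpr
            (hsuf.trans ((List.suffix_cons '*' _).trans (List.suffix_cons '*' _)))
        simp [pvP, m0, m1, m2]
      have hslice : PySem.Chars.slice (PySem.Chars.strip line) (some 2) (some (-2)) =
          k.take (k.length - 2) := by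
        rw [hs]
        have hlen : ('*' :: '*' :: k).length = (k.length - 2) + 4 := by
          simp
          omega
        rw [pv_slice_2_neg2 _ _ hlen]
        rw [show ('*' :: '*' :: k).drop 2 = k from rfl]
      rw [hFB, if_pos hB, hP, if_pos rfl]
      simp only [Option.map_some, Option.some.injEq]
      simp only [pvG]
      rw [hslice]
    · have hP : pvP line = false := by
        by_contra hP
        have hPt : pvP line = true := by simpa using hP
        simp only [pvP, Bool.and_eq_true] at hPt
        obtain ⟨⟨_, hin⟩, hend⟩ := hPt
        rw [hs] at hin hend
        have hin' : ':' ∈ k := by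
          have := (pv_isIn_singleton _ _).mp hin
          simpa using this
        have hsufS : ['*', '*'] <:+ '*' :: '*' :: k := (PySem.Chars.endswith_iff _ _).mp hend
        have hklen : 1 ≤ k.length := List.length_pos_iff.mpr (List.ne_nil_of_mem hin')
        have hk2 : 2 ≤ k.length := by
          by_contra hlt
          have hkl1 : k.length = 1 := by omega
          obtain ⟨x, hx⟩ : ∃ x, k = [x] := List.length_eq_one_iff.mp hkl1
          have hxc : ':' = x := by
            rw [hx] at hin'
            simpa using hin'
          rw [hx, ← hxc] at hsufS
          have := List.suffix_iff_eq_drop.mp hsufS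
          simp [List.drop] at this
        have hsufk : ['*', '*'] <:+ k := by
          rw [List.suffix_iff_eq_drop] at hsufS ⊢
          obtain ⟨j, hj⟩ : ∃ j, k.length = j + 2 := ⟨k.length - 2, by omega⟩
          have hlenS : ('*' :: '*' :: k).length = j + 4 := by simp [hj]
          rw [hlenS] at hsufS
          rw [show (['*', '*'] : List Char).length = 2 from rfl] at hsufS ⊢
          rw [show j + 4 - 2 = (j + 1) + 1 from by omega, List.drop_succ_cons,
            List.drop_succ_cons] at hsufS
          rw [hj, show j + 2 - 2 = j from by omega]
          exact hsufS
        have hB' : (PySem.Chars.endswith k ['*', '*'] && PySem.Chars.isIn [':'] (k.take (k.length - 2))) = true := by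
          have e1 : PySem.Chars.endswith k ['*', '*'] = true := (PySem.Chars.endswith_iff _ _).mpr hsufk
          have hke : k = k.take (k.length - 2) ++ ['*', '*'] := by
            have hdropeq : ['*', '*'] = k.drop (k.length - 2) := by
              have := List.suffix_iff_eq_drop.mp hsufk
              simpa using this
            conv_lhs => rw [← List.take_append_drop (k.length - 2) k]
            rw [← hdropeq]
          have e2 : ':' ∈ k.take (k.length - 2) := by
            rw [hke] at hin'
            rcases List.mem_append.mp hin' with hh | hh
            · exact hh
            · simp at hh
          simp [e1, (pv_isIn_singleton _ _).mpr e2]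
        exact hB hB'
      rw [hFB, if_neg hB, hP]
      simp
  · have hFB : pvFB line = none := by simp [pvFB, h2]
    have hP : pvP line = false := by
      by_contra hP
      have hPt : pvP line = true := by simpa using hP
      simp only [pvP, Bool.and_eq_true] at hPt
      have hsw := hPt.1.1
      have hpre : ['*', '*'] <+: PySem.Chars.strip line := (PySem.Chars.startswith_iff _ _).mp hsw
      have hpre2 : PySem.Chars.strip line <+: line.dropWhile PySem.Chars.isspace := by
        rw [pv_strip_eq]
        exact pv_rstrip_prefix _
      have hpre3 : ['*', '*'] <+: line.dropWhile PySem.Chars.isspace := hpre.trans hpre2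
      obtain ⟨u, hu⟩ := hpre3
      apply h2
      rw [← hu]
      rfl
    rw [hFB, hP]
    simp

lemma pv_dropWhile_cons_head {α : Type} (p : α → Bool) :
    ∀ (l : List α) {c : α} {t : List α}, l.dropWhile p = c :: t → p c = false := by
  intro l
  induction l with
  | nil => intro c t h; simp at h
  | cons a l ih =>
    intro c t h
    rw [List.dropWhile_cons] at h
    split_ifs at h with ha
    · exact ih h
    · obtain ⟨rfl, rfl⟩ := List.cons_eq_cons.mp h
      simpa using ha

-- pvScan computes the per-line capture groups, in order
lemma pv_scan_eq_aux : ∀ (n : Nat) (cs : List Char), cs.length ≤ n →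
    pvScan cs = (pvLines cs).filterMap pvFB := by
  intro n
  induction n with
  | zero =>
    intro cs h
    have : cs = [] := List.eq_nil_of_length_eq_zero (Nat.le_zero.mp h)
    subst this
    rw [pvScan, pvLines]
    simp [pvFB]
  | succ n ih =>
    intro cs hlen
    rcases hdw : cs.dropWhile (· != '\n') with _ | ⟨c0, t⟩
    · -- no '\n' in cs
      have hall : ∀ x ∈ cs, (x != '\n') = true := List.dropWhile_eq_nil_iff.mp hdw
      have htake : cs.takeWhile (· != '\n') = cs := List.takeWhile_eq_self_iff.mpr hall
      have hlines : pvLines cs = [cs] := by rw [pvLines]; simp [hdw, htake]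
      have hrem : (((cs.dropWhile PySem.Chars.isspace).drop 2).takeWhile (· != '\n')) =
          (cs.dropWhile PySem.Chars.isspace).drop 2 := by
        apply List.takeWhile_eq_self_iff.mpr
        intro x hx
        exact hall x ((List.dropWhile_sublist _).subset (List.drop_subset _ _ hx))
      have hrem2 : (((cs.dropWhile PySem.Chars.isspace).drop 2).dropWhile (· != '\n')) = [] := by
        apply List.dropWhile_eq_nil_iff.mpr
        intro x hx
        exact hall x ((List.dropWhile_sublist _).subset (List.drop_subset _ _ hx))
      rw [pvScan, hlines]
      simp only [hdw, hrem, hrem2, dif_pos rfl]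
      simp only [pvFB, List.filterMap_cons, List.filterMap_nil, hrem]
      split_ifs <;> first | rfl | simp
    · have hc0 : c0 = '\n' := by
        have := pv_dropWhile_cons_head (· != '\n') cs hdw
        simpa using this
      subst hc0
      have hcs : cs = cs.takeWhile (· != '\n') ++ '\n' :: t := by
        conv_lhs => rw [← List.takeWhile_append_dropWhile (p := (· != '\n')) (l := cs)]
        rw [hdw]
      set L := cs.takeWhile (· != '\n') with hL
      have hLnl : ∀ x ∈ L, (x != '\n') = true := by
        intro x hx
        rw [hL] at hx
        exact List.mem_takeWhile_imp (p := fun y => y != '\n') (l := cs) hx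
      have hlen_t : t.length ≤ n := by
        have := congrArg List.length hcs
        simp at this
        omega
      have hlines : pvLines cs = L :: pvLines t := by
        rw [pvLines]
        simp [hdw]
        exact hL.symm
      by_cases hall : L.dropWhile PySem.Chars.isspace = []
      · -- first line entirely whitespace: the '^\s*' skip runs across it
        have hnlws : PySem.Chars.isspace '\n' = true := by decide
        have hawcs : cs.dropWhile PySem.Chars.isspace = t.dropWhile PySem.Chars.isspace := by
          conv_lhs => rw [hcs]
          rw [List.dropWhile_append]
          rw [if_pos (by simp [hall])]
          simp [List.dropWhile_cons, hnlws]
        have hFBL : pvFB L = none := by simp [pvFB, hall]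
        have hstep : pvScan cs = pvScan t := by
          conv_lhs => rw [pvScan]
          simp only [hawcs, hdw]
          rw [dif_neg (List.cons_ne_nil '\n' t), List.tail_cons]
          split_ifs with h1 hcnd hrem
          · conv_rhs => rw [pvScan]
            rw [if_pos h1, if_pos hcnd]
            simp [hrem]
          · conv_rhs => rw [pvScan]
            rw [if_pos h1, if_pos hcnd]
            simp [hrem]
          · rfl
          · rfl
        rw [hstep, ih t hlen_t, hlines, List.filterMap_cons, hFBL]
      · set M := L.dropWhile PySem.Chars.isspace with hM
        have hawcs : cs.dropWhile PySem.Chars.isspace = M ++ '\n' :: t := by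
          conv_lhs => rw [hcs]
          rw [List.dropWhile_append]
          rw [if_neg (show ¬((List.dropWhile PySem.Chars.isspace L).isEmpty = true) from by
            rw [List.isEmpty_iff]; exact hall)]
        have hMnl : ∀ x ∈ M, (x != '\n') = true := fun x hx =>
          hLnl x ((List.dropWhile_sublist _).subset hx)
        by_cases h2 : M.take 2 = ['*', '*']
        · obtain ⟨Mr, hMr⟩ := pv_take2_cons _ h2
          have h2' : (cs.dropWhile PySem.Chars.isspace).take 2 = ['*', '*'] := by
            rw [hawcs, hMr]
            rfl
          have hrest : (cs.dropWhile PySem.Chars.isspace).drop 2 = Mr ++ '\n' :: t := by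
            rw [hawcs, hMr]
            rfl
          have hMrnl : ∀ x ∈ Mr, (x != '\n') = true := fun x hx => hMnl x (by simp [hMr, hx])
          have htakeMr : (Mr ++ '\n' :: t).takeWhile (· != '\n') = Mr := by
            rw [List.takeWhile_append]
            rw [if_pos (by rw [List.takeWhile_eq_self_iff.mpr hMrnl])]
            simp [List.takeWhile_cons]
          have hdropMr : (Mr ++ '\n' :: t).dropWhile (· != '\n') = '\n' :: t := by
            rw [List.dropWhile_append]
            rw [if_pos (by simp [List.dropWhile_eq_nil_iff.mpr hMrnl])]
            simp [List.dropWhile_cons]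
          have hFBL : pvFB L =
              if PySem.Chars.endswith (PySem.Chars.rstrip Mr) ['*', '*'] &&
                  PySem.Chars.isIn [':']
                    ((PySem.Chars.rstrip Mr).take ((PySem.Chars.rstrip Mr).length - 2)) then
                some ((PySem.Chars.rstrip Mr).take ((PySem.Chars.rstrip Mr).length - 2))
              else none := by
            simp only [pvFB, ← hM, hMr]
            rw [if_pos (show List.take 2 ('*' :: '*' :: Mr) = ['*', '*'] from rfl)]
            rw [show ('*' :: '*' :: Mr).drop 2 = Mr from rfl,
              List.takeWhile_eq_self_iff.mpr hMrnl]
          conv_lhs => rw [pvScan]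
          simp only [h2', if_true, hrest, htakeMr, hdropMr, hdw]
          rw [dif_neg (List.cons_ne_nil '\n' t), List.tail_cons]
          rw [hlines, List.filterMap_cons, hFBL, ih t hlen_t]
          split_ifs with hcnd
          · simp
          · simp
        · have h2' : ¬((cs.dropWhile PySem.Chars.isspace).take 2 = ['*', '*']) := by
            rw [hawcs]
            rcases hMc : M with _ | ⟨m, ms⟩
            · exact absurd hMc hall
            · rcases ms with _ | ⟨m2, ms2⟩
              · intro heq
                simp [List.take] at heq
              · intro heq
                simp [List.take] at heq
                exact h2 (by rw [hMc]; simp [List.take, heq.1, heq.2])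
          have hFBL : pvFB L = none := by simp [pvFB, ← hM, h2]
          conv_lhs => rw [pvScan]
          simp only [h2', if_false, hdw]
          rw [dif_neg (List.cons_ne_nil '\n' t), List.tail_cons]
          rw [hlines, List.filterMap_cons, hFBL, ih t hlen_t]

lemma pv_scan_eq (cs : List Char) : pvScan cs = (pvLines cs).filterMap pvFB :=
  pv_scan_eq_aux cs.length cs le_rfl

-- ===== VERDICT (by name: the statement is the Claim_ definition above) =====
theorem extract_scene_titles_spec : Claim_equal_extract_scene_titles := by
  intro c _
  unfold Spec_extract_scene_titles extract_scene_titles_alt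
  rw [pv_A_shape, pv_scan_eq, List.map_filterMap]
  have h1 : ∀ l ∈ pvLines c.toList,
      (fun l => (pvFB l).map (fun g => String.ofList (PySem.Chars.strip g))) l =
        (fun l => if pvP l then some (pvG l) else none) l := by
    intro l hl
    exact (pv_perline l (pv_lines_no_nl c.toList l hl)).symm
  rw [List.filterMap_congr h1]
  induction pvLines c.toList with
  | nil => rfl
  | cons a t ih =>
    simp only [List.filterMap_cons, List.filter_cons]
    by_cases hp : pvP a = true
    · simp [hp, ih]
    · simp [hp, ih]
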